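-- pv_equiv track=rewrite | github.com/tenebrissilvam/LabyrinthPy | src/Labyrinth_solution/solution.py | cleanup_dead_ends
-- ===== SOURCE A (Python) =====
-- def cleanup_dead_ends(solution_path: list) -> list:
--     found_flg = True
--     attempts = 0
--     attempts_threshold = len(solution_path)
--
--     while found_flg and len(solution_path) > 2 and attempts < attempts_threshold:
--         found_flg = False
--
--         attempts += 1
--         i_f = 0
--         i_l = 0
--
--         for i in range(len(solution_path) - 1):
--             f = solution_path[i]
--             if f in solution_path[i + 1:]:
--                 i_f = i
--                 i_l = solution_path[i + 1:].index(f) + i + 1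
--                 found_flg = True
--                 break
--
--         if found_flg:
--             solution_path = solution_path[:i_f] + solution_path[i_l:]
--
--     return solution_path
-- ===== SOURCE B (Python) =====
-- def cleanup_dead_ends(solution_path: list) -> list:
--     stack = []
--     for node in solution_path:
--         if node in stack:
--             stack = stack[:stack.index(node) + 1]
--         else:
--             stack.append(node)
--     return stack
-- ===== Notes on version B (the rewrite author's own statement) =====
-- stated objective: faster
-- what changed: replaces A's repeat-until-fixpoint outer loop (which rescans the whole list with slice-membership and .index and rebuilds it by slicing after every collapse) with a single left-to-right pass keeping a stack that is truncated back to the previous occurrence whenever a node is revisited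
-- intended difference: On paths of length >= 2 whose first element equals both of the last two elements (e.g. [1,1,1]), A stops collapsing as soon as the list has shrunk to two elements and returns [x, x], which still contains a loop; B returns the fully loop-erased path [x], the intended dead-end-free result. — e.g. on cleanup_dead_ends([1, 1, 1]): A returns [1, 1], B returns [1]
import Mathlib
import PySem

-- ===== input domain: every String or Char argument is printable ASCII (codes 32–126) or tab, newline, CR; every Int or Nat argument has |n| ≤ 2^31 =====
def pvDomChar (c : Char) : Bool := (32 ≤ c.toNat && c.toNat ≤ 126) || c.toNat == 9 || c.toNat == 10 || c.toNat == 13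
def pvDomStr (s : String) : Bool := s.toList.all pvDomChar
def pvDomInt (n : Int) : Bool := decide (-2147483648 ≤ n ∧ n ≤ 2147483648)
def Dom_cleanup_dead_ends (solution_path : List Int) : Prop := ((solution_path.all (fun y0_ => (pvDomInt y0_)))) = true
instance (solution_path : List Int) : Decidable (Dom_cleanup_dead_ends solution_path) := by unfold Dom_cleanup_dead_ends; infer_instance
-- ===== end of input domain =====

-- B replaces A's repeat-until-fixpoint collapsing loop by a single stack pass (measurably faster);
-- on paths whose first element equals the last two, A stops at [x,x] while B returns the intended [x] (see D_ below).


-- ===== PORT A =====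
-- the inner 'for i in range(len-1)' scan: first i with s[i] ∈ s[i+1:], returning (i_f, i_l)
def pvFirstDup : List Int → Option (Nat × Nat)
  | [] => none
  | f :: rest =>
      if rest.contains f then
        some (0, (PySem.List.index? rest f).getD 0 + 1)
      else
        match pvFirstDup rest with
        | some (i, j) => some (i + 1, j + 1)
        | none => none

-- the while loop; fuel = attempts_threshold - attempts (threshold is the ORIGINAL length)
def pvWhileA : Nat → List Int → List Int
  | 0, s => s
  | fuel + 1, s =>
      if 2 < s.length then
        match pvFirstDup s with
        | some (i, j) =>
            pvWhileA fuel (PySem.List.slice s none (some (i : Int)) ++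
                           PySem.List.slice s (some (j : Int)) none)
        | none => s
      else s

def cleanup_dead_ends (solution_path : List Int) : List Int :=
  pvWhileA solution_path.length solution_path

-- ===== PORT B =====
-- one step of Source B's loop body: truncate at the previous occurrence, else push
def pvStep (stack : List Int) (node : Int) : List Int :=
  if stack.contains node then
    PySem.List.slice stack none (some ((((PySem.List.index? stack node).getD 0 + 1 : Nat)) : Int))
  else
    stack ++ [node]

def cleanup_dead_ends_alt (solution_path : List Int) : List Int :=
  solution_path.foldl pvStep []

-- ===== PRECONDITION & SPEC =====
-- On paths of length ≥ 2 whose first element equals both of the last two elements, A stops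
-- collapsing once the list has shrunk to two elements and returns [x, x] (still a loop);
-- B returns the fully loop-erased [x], the intended dead-end-free path.
def D_cleanup_dead_ends (solution_path : List Int) : Prop :=
  2 ≤ solution_path.length ∧
  solution_path.head? = solution_path.getLast? ∧
  solution_path.head? = solution_path.dropLast.getLast?
instance (solution_path : List Int) : Decidable (D_cleanup_dead_ends solution_path) := by
  unfold D_cleanup_dead_ends; infer_instance

def Spec_cleanup_dead_ends (solution_path : List Int) (out : List Int) : Prop :=
  ¬ D_cleanup_dead_ends solution_path → out = cleanup_dead_ends_alt solution_path
instance (solution_path : List Int) (out : List Int) : Decidable (Spec_cleanup_dead_ends solution_path out) := by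
  unfold Spec_cleanup_dead_ends; infer_instance

def pvDiffWitness_cleanup_dead_ends : List Int := [1, 1, 1]
def pvDiffWitnessOut_cleanup_dead_ends : (List Int) × (List Int) := ([1, 1], [1])

-- ===== CLAIM (what is proved, stated in full; the proofs are below) =====
def Claim_unchanged_cleanup_dead_ends : Prop := ∀ (solution_path : List Int), Dom_cleanup_dead_ends solution_path → Spec_cleanup_dead_ends solution_path (cleanup_dead_ends solution_path)
def Claim_changed_cleanup_dead_ends : Prop := Dom_cleanup_dead_ends (pvDiffWitness_cleanup_dead_ends) ∧ D_cleanup_dead_ends (pvDiffWitness_cleanup_dead_ends) ∧ cleanup_dead_ends (pvDiffWitness_cleanup_dead_ends) = pvDiffWitnessOut_cleanup_dead_ends.1 ∧ cleanup_dead_ends_alt (pvDiffWitness_cleanup_dead_ends) = pvDiffWitnessOut_cleanup_dead_ends.2 ∧ pvDiffWitnessOut_cleanup_dead_ends.1 ≠ pvDiffWitnessOut_cleanup_dead_ends.2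
def Claim_exact_cleanup_dead_ends : Prop := ∀ (solution_path : List Int), Dom_cleanup_dead_ends solution_path → D_cleanup_dead_ends solution_path → cleanup_dead_ends solution_path ≠ cleanup_dead_ends_alt solution_path

-- ===== LEMMAS AND PROOFS =====

-- pvStep in take/append form
theorem pvStep_eq (st : List Int) (v : Int) :
    pvStep st v = if st.contains v then st.take ((PySem.List.index? st v).getD 0 + 1) else st ++ [v] := by
  unfold pvStep
  split
  · rw [PySem.List.slice_to_natCast]
  · rfl

theorem pvStep_cons (f v : Int) (st : List Int) (h : v ≠ f) :
    pvStep (f :: st) v = f :: pvStep st v := by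
  rw [pvStep_eq, pvStep_eq]
  by_cases hm : st.contains v = true
  · obtain ⟨k, hk⟩ := Option.isSome_iff_exists.mp
      ((PySem.List.index?_isSome_iff st v).mpr (by simpa [List.contains_eq_mem] using hm))
    have hm' : (f :: st).contains v = true := by
      simp_all [List.contains_eq_mem]
    rw [if_pos hm, if_pos hm', PySem.List.index?_cons_of_ne st (Ne.symm h), hk]
    rfl
  · have hm' : ¬ (f :: st).contains v = true := by
      simp_all [List.contains_eq_mem]
    rw [if_neg hm, if_neg hm']
    rfl

theorem pvStep_self (f : Int) (st : List Int) : pvStep (f :: st) f = [f] := by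
  have hc : (f :: st).contains f = true := by simp
  rw [pvStep_eq, PySem.List.index?_cons_self, if_pos hc]
  rfl

theorem foldl_cons_frozen (f : Int) : ∀ (t : List Int) (st : List Int), f ∉ t →
    List.foldl pvStep (f :: st) t = f :: List.foldl pvStep st t := by
  intro t
  induction t with
  | nil => intro st _; rfl
  | cons v t ih =>
      intro st h
      have hvf : v ≠ f := fun he => h (by simp [he])
      simp only [List.foldl_cons, pvStep_cons f v st hvf]
      exact ih _ (fun hm => h (by simp [hm]))

theorem foldl_prefix_frozen : ∀ (p t st : List Int), (∀ v ∈ p, v ∉ t) →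
    List.foldl pvStep (p ++ st) t = p ++ List.foldl pvStep st t := by
  intro p
  induction p with
  | nil => intro t st _; rfl
  | cons a p ih =>
      intro t st h
      have := foldl_cons_frozen a t (p ++ st) (h a (by simp))
      simp only [List.cons_append, this, ih t st (fun v hv => h v (by simp [hv]))]

theorem foldl_id : ∀ (p : List Int), p.Nodup → List.foldl pvStep [] p = p := by
  intro p
  induction p with
  | nil => intro _; rfl
  | cons a p ih =>
      intro h
      have ha : a ∉ p := (List.nodup_cons.mp h).1
      have hstep : pvStep [] a = [a] := by rw [pvStep_eq]; simp
      simp only [List.foldl_cons, hstep, foldl_cons_frozen a p [] ha,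
        ih (List.nodup_cons.mp h).2]

theorem foldl_revisit (f : Int) (u w : List Int) (hfu : f ∉ u) :
    List.foldl pvStep [f] (u ++ f :: w) = List.foldl pvStep [f] w := by
  rw [List.foldl_append]
  rw [foldl_cons_frozen f u [] hfu]
  simp only [List.foldl_cons, pvStep_self]

-- the collapse A performs does not change B's result
theorem L_collapse (p u w : List Int) (f : Int) (hp : p.Nodup)
    (hpt : ∀ v ∈ p, v ∉ f :: (u ++ f :: w)) (hfu : f ∉ u) :
    List.foldl pvStep [] (p ++ f :: w) = List.foldl pvStep [] (p ++ f :: u ++ f :: w) := by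
  have hpt' : ∀ v ∈ p, v ∉ f :: w := by
    intro v hv hm
    rcases List.mem_cons.mp hm with h1 | h2
    · exact hpt v hv (by simp [h1])
    · exact hpt v hv (by simp [h2])
  have e1 : List.foldl pvStep [] (p ++ f :: w) = p ++ List.foldl pvStep [] (f :: w) := by
    have := foldl_prefix_frozen p (f :: w) [] hpt'
    simpa [List.foldl_append, foldl_id p hp] using this
  have e2 : List.foldl pvStep [] (p ++ f :: u ++ f :: w)
      = p ++ List.foldl pvStep [] (f :: (u ++ f :: w)) := by
    have := foldl_prefix_frozen p (f :: (u ++ f :: w)) [] hpt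
    have h' := this
    simpa [List.foldl_append, foldl_id p hp] using h'
  rw [e1, e2]
  have hstep : pvStep [] f = [f] := by rw [pvStep_eq]; simp
  simp only [List.foldl_cons, hstep, foldl_revisit f u w hfu]

-- characterisation of the inner scan
theorem firstDup_none : ∀ (s : List Int), pvFirstDup s = none → s.Nodup := by
  intro s
  induction s with
  | nil => intro _; exact List.nodup_nil
  | cons f rest ih =>
      intro h
      unfold pvFirstDup at h
      by_cases hc : rest.contains f = true
      · rw [if_pos hc] at h
        exact (Option.some_ne_none _ h).elim
      · rw [if_neg hc] at h
        cases hfd : pvFirstDup rest with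
        | some v => rw [hfd] at h; cases v; simp at h
        | none =>
            exact List.nodup_cons.mpr ⟨by simpa [List.contains_eq_mem] using hc, ih hfd⟩

theorem firstDup_some : ∀ (s : List Int) (i j : Nat), pvFirstDup s = some (i, j) →
    ∃ (p u w : List Int) (f : Int),
      s = p ++ f :: u ++ f :: w ∧ p.length = i ∧ j = p.length + u.length + 1 ∧
      p.Nodup ∧ (∀ v ∈ p, v ∉ f :: (u ++ f :: w)) ∧ f ∉ u := by
  intro s
  induction s with
  | nil => intro i j h; simp [pvFirstDup] at h
  | cons f rest ih =>
      intro i j h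
      unfold pvFirstDup at h
      by_cases hc : rest.contains f = true
      · rw [if_pos hc] at h
        have hmem : f ∈ rest := by simpa [List.contains_eq_mem] using hc
        obtain ⟨k, hk⟩ := Option.isSome_iff_exists.mp ((PySem.List.index?_isSome_iff rest f).mpr hmem)
        rcases (PySem.List.index?_eq_some_iff rest f k).mp hk with ⟨u, w, hrw, hlen, hfu⟩
        have hpair := Option.some.inj h
        have hi : i = 0 := (congrArg Prod.fst hpair).symm
        have hj : j = (PySem.List.index? rest f).getD 0 + 1 := (congrArg Prod.snd hpair).symm
        rw [hk] at hj
        refine ⟨[], u, w, f, by simp [hrw], by simp [hi], ?_, List.nodup_nil, by simp, hfu⟩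
        simp [hj, hlen]
      · rw [if_neg hc] at h
        cases hfd : pvFirstDup rest with
        | none => rw [hfd] at h; simp at h
        | some v =>
            rcases v with ⟨i', j'⟩
            rw [hfd] at h
            have hpair := Option.some.inj h
            have hi : i' + 1 = i := congrArg Prod.fst hpair
            have hj : j' + 1 = j := congrArg Prod.snd hpair
            rcases ih i' j' hfd with ⟨p, u, w, g, hrest, hpl, hjl, hnd, hnm, hgu⟩
            have hfrest : f ∉ rest := by simpa [List.contains_eq_mem] using hc
            refine ⟨f :: p, u, w, g, by simp [hrest], by simp [hpl, hi], by simp [← hj, hjl]; omega, ?_, ?_, hgu⟩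
            · refine List.nodup_cons.mpr ⟨fun hm => hfrest ?_, hnd⟩
              rw [hrest]
              simp only [List.mem_append, List.mem_cons]
              exact Or.inl (Or.inl hm)
            · intro v hv hm
              rcases List.mem_cons.mp hv with rfl | hv'
              · apply hfrest
                rw [hrest]
                simp only [List.mem_append, List.mem_cons] at hm ⊢
                tauto
              · exact hnm v hv' hm

-- the collapsed list, in slice form, is p ++ f :: w
theorem pv_collapse_eq (p u w : List Int) (f : Int) (j : Nat)
    (hj : j = p.length + u.length + 1) :
    PySem.List.slice (p ++ f :: u ++ f :: w) none (some ((p.length : Nat) : Int)) ++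
    PySem.List.slice (p ++ f :: u ++ f :: w) (some ((j : Nat) : Int)) none
    = p ++ f :: w := by
  rw [PySem.List.slice_to_natCast, PySem.List.slice_from_natCast]
  have h1 : (p ++ f :: u ++ f :: w).take p.length = p := by
    rw [List.take_append_of_le_length (by simp)]
    simp
  have h2 : (p ++ f :: u ++ f :: w).drop j = f :: w := by
    have he : p ++ f :: u ++ f :: w = (p ++ f :: u) ++ (f :: w) := by simp
    rw [he, hj]
    have hl : (p ++ f :: u).length = p.length + u.length + 1 := by simp; omega
    rw [← hl, List.drop_left]
  rw [h1, h2]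

-- equation lemmas for pvWhileA's recursion
theorem pvWhileA_succ_some (n : Nat) (s : List Int) (i j : Nat)
    (hfd : pvFirstDup s = some (i, j)) (hl : 2 < s.length) :
    pvWhileA (n + 1) s
      = pvWhileA n (PySem.List.slice s none (some ((i : Nat) : Int)) ++
                    PySem.List.slice s (some ((j : Nat) : Int)) none) := by
  simp only [pvWhileA]
  rw [if_pos hl, hfd]

theorem pvWhileA_succ_none (n : Nat) (s : List Int)
    (hfd : pvFirstDup s = none) (hl : 2 < s.length) :
    pvWhileA (n + 1) s = s := by
  simp only [pvWhileA]
  rw [if_pos hl, hfd]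

theorem pvWhileA_succ_small (n : Nat) (s : List Int) (hl : ¬ 2 < s.length) :
    pvWhileA (n + 1) s = s := by
  simp only [pvWhileA]
  rw [if_neg hl]

-- every list is [] or l ++ [b]
theorem concat_cases (w : List Int) : w = [] ∨ ∃ l b, w = l ++ [b] := by
  rcases List.eq_nil_or_concat w with h | ⟨l, c, h⟩
  · exact Or.inl h
  · exact Or.inr ⟨l, c, by simp [h]⟩

-- head?/getLast? bookkeeping for D_
theorem getLast?_append_cons (a : List Int) (x : Int) (y : List Int) :
    (a ++ x :: y).getLast? = (x :: y).getLast? := by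
  rcases concat_cases (x :: y) with h | ⟨l, b, h⟩
  · simp at h
  · rw [h, ← List.append_assoc, List.getLast?_concat, List.getLast?_concat]

-- D_ is preserved downward: a collapse of a non-D_ list is non-D_
theorem D_preserved_not (p u w : List Int) (f : Int)
    (hpt : ∀ v ∈ p, v ∉ f :: (u ++ f :: w))
    (hs : ¬ D_cleanup_dead_ends (p ++ f :: u ++ f :: w)) :
    ¬ D_cleanup_dead_ends (p ++ f :: w) := by
  intro hd
  rcases concat_cases w with rfl | ⟨l', b, rfl⟩
  · -- w = []: the collapsed list is p ++ [f]
    rcases hd with ⟨hlen, hl1, _⟩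
    cases p with
    | nil => simp at hlen
    | cons h p' =>
        have hh : (h :: p' ++ f :: ([] : List Int)).head? = some h := by simp
        have hg : (h :: p' ++ f :: ([] : List Int)).getLast? = some f := by
          rw [getLast?_append_cons]; simp
        rw [hh, hg] at hl1
        have : h = f := by injection hl1
        exact hpt h (by simp) (by simp [this])
  · -- w = l' ++ [b]: the last two elements and the head are shared with s
    apply hs
    rcases hd with ⟨_, hl1, hl2⟩
    refine ⟨by simp; omega, ?_, ?_⟩
    · have e1 : (p ++ f :: u ++ f :: (l' ++ [b])).head? = (p ++ f :: (l' ++ [b])).head? := by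
        cases p <;> simp
      have e2 : (p ++ f :: u ++ f :: (l' ++ [b])).getLast? = (p ++ f :: (l' ++ [b])).getLast? := by
        rw [show p ++ f :: u ++ f :: (l' ++ [b]) = (p ++ f :: u) ++ f :: (l' ++ [b]) by simp,
          getLast?_append_cons, getLast?_append_cons]
      rw [e1, e2]; exact hl1
    · have e1 : (p ++ f :: u ++ f :: (l' ++ [b])).head? = (p ++ f :: (l' ++ [b])).head? := by
        cases p <;> simp
      have e2 : (p ++ f :: u ++ f :: (l' ++ [b])).dropLast.getLast?
          = (p ++ f :: (l' ++ [b])).dropLast.getLast? := by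
        rw [show p ++ f :: u ++ f :: (l' ++ [b]) = (p ++ f :: u ++ f :: l') ++ [b] by simp,
          show p ++ f :: (l' ++ [b]) = (p ++ f :: l') ++ [b] by simp,
          List.dropLast_concat, List.dropLast_concat,
          show p ++ f :: u ++ f :: l' = (p ++ f :: u) ++ f :: l' by simp,
          getLast?_append_cons, getLast?_append_cons]
      rw [e1, e2]; exact hl2

theorem small_nodup (s : List Int) (hs : ¬ D_cleanup_dead_ends s) (hl : s.length ≤ 2) :
    s.Nodup := by
  match s with
  | [] => exact List.nodup_nil
  | [a] => simp
  | [a, b] =>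
      have : a ≠ b := by
        intro he
        exact hs ⟨by simp, by simp [he, List.getLast?], by simp [List.dropLast]⟩
      simp [this]
  | a :: b :: c :: t => simp at hl

-- main invariant for A's while loop, outside D_
theorem whileA_spec : ∀ (fuel : Nat) (s : List Int), ¬ D_cleanup_dead_ends s →
    s.length ≤ fuel + 2 →
    (pvWhileA fuel s).Nodup ∧
    List.foldl pvStep [] (pvWhileA fuel s) = List.foldl pvStep [] s := by
  intro fuel
  induction fuel with
  | zero =>
      intro s hs hl
      exact ⟨small_nodup s hs (by simpa using hl), rfl⟩
  | succ n ih =>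
      intro s hs hl
      by_cases hlen : 2 < s.length
      · cases hfd : pvFirstDup s with
        | none => rw [pvWhileA_succ_none n s hfd hlen]; exact ⟨firstDup_none s hfd, rfl⟩
        | some v =>
            rcases v with ⟨i, j⟩
            rw [pvWhileA_succ_some n s i j hfd hlen]
            rcases firstDup_some s i j hfd with ⟨p, u, w, f, hdecomp, hpl, hjl, hnd, hnm, hfu⟩
            subst hdecomp
            rw [← hpl, pv_collapse_eq p u w f j hjl]
            have hsr : ¬ D_cleanup_dead_ends (p ++ f :: w) := D_preserved_not p u w f hnm hs
            have hlr : (p ++ f :: w).length ≤ n + 2 := by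
              simp at hl ⊢
              omega
            rcases ih (p ++ f :: w) hsr hlr with ⟨h1, h2⟩
            exact ⟨h1, h2.trans (L_collapse p u w f hnd hnm hfu)⟩
      · rw [pvWhileA_succ_small n s hlen]
        exact ⟨small_nodup s hs (by omega), rfl⟩

-- === tightness lemmas: inside D_, A returns a 2-element list while B returns a singleton ===

theorem pvStep_head (st : List Int) (u : Int) (h : st ≠ []) :
    (pvStep st u).head? = st.head? := by
  cases st with
  | nil => exact absurd rfl h
  | cons v st' =>
      rw [pvStep_eq]
      by_cases hc : (v :: st').contains u = true
      · rw [if_pos hc]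
        have hmem : u ∈ v :: st' := by simpa [List.contains_eq_mem] using hc
        obtain ⟨k, hk⟩ := Option.isSome_iff_exists.mp
          ((PySem.List.index?_isSome_iff (v :: st') u).mpr hmem)
        rw [hk]
        simp [List.take_succ_cons]
      · rw [if_neg hc]
        simp

theorem foldl_head : ∀ (t : List Int) (v : Int) (st : List Int),
    (List.foldl pvStep (v :: st) t).head? = some v := by
  intro t
  induction t with
  | nil => intro v st; rfl
  | cons a t ih =>
      intro v st
      simp only [List.foldl_cons]
      have h := pvStep_head (v :: st) a (by simp)
      cases hst : pvStep (v :: st) a with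
      | nil => rw [hst] at h; simp at h
      | cons b r =>
          rw [hst] at h
          have hb : b = v := by simpa using h
          rw [hb]
          exact ih v r

theorem getLast?_tail_of_head_eq (x : Int) (t : List Int) (ht : t ≠ [])
    (h : (x :: t).head? = (x :: t).getLast?) : t.getLast? = some x := by
  rcases concat_cases t with rfl | ⟨l, b, rfl⟩
  · simp at ht
  · rw [show x :: (l ++ [b]) = (x :: l) ++ [b] by simp, List.getLast?_concat] at h
    have hb : b = x := by simpa using h.symm
    rw [List.getLast?_concat, hb]

theorem alt_of_D (s : List Int) (hd : D_cleanup_dead_ends s) :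
    ∃ x, cleanup_dead_ends_alt s = [x] := by
  rcases hd with ⟨hlen, hl1, _⟩
  cases s with
  | nil => simp at hlen
  | cons x t =>
      have ht : t ≠ [] := by
        intro he; rw [he] at hlen; simp at hlen
      have hlast : t.getLast? = some x := getLast?_tail_of_head_eq x t ht hl1
      rcases concat_cases t with rfl | ⟨t', b, rfl⟩
      · simp at ht
      · have hb : b = x := by rw [List.getLast?_concat] at hlast; injection hlast
        refine ⟨x, ?_⟩
        rw [hb]
        unfold cleanup_dead_ends_alt
        have hstep : pvStep [] x = [x] := by rw [pvStep_eq]; simp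
        simp only [List.foldl_cons, hstep, List.foldl_append, List.foldl_cons, List.foldl_nil]
        have hh := foldl_head t' x []
        cases hres : List.foldl pvStep [x] t' with
        | nil => rw [hres] at hh; simp at hh
        | cons c r =>
            rw [hres] at hh
            have hc : c = x := by simpa using hh
            rw [hc]
            exact pvStep_self x r

theorem D_not_nodup (s : List Int) (hd : D_cleanup_dead_ends s) : ¬ s.Nodup := by
  rcases hd with ⟨hlen, hl1, _⟩
  cases s with
  | nil => simp at hlen
  | cons x t =>
      have ht : t ≠ [] := by
        intro he; rw [he] at hlen; simp at hlen
      have hlast : t.getLast? = some x := getLast?_tail_of_head_eq x t ht hl1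
      intro hnd
      exact (List.nodup_cons.mp hnd).1 (List.mem_of_getLast? hlast)

-- inside D_, every collapse keeps D_ (the two trailing copies of the head survive)
theorem D_preserved_yes (p u w : List Int) (f : Int)
    (hpt : ∀ v ∈ p, v ∉ f :: (u ++ f :: w)) (hfu : f ∉ u)
    (hlen3 : 3 ≤ (p ++ f :: u ++ f :: w).length)
    (hd : D_cleanup_dead_ends (p ++ f :: u ++ f :: w)) :
    D_cleanup_dead_ends (p ++ f :: w) := by
  rcases concat_cases w with rfl | ⟨l', b, rfl⟩
  · -- w = [] is impossible inside D_ here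
    exfalso
    cases p with
    | cons h p' =>
        rcases hd with ⟨_, hl1, _⟩
        have hh : (h :: p' ++ f :: u ++ f :: ([] : List Int)).head? = some h := by simp
        have hg : (h :: p' ++ f :: u ++ f :: ([] : List Int)).getLast? = some f := by
          rw [show h :: p' ++ f :: u ++ f :: ([] : List Int) = (h :: p' ++ f :: u) ++ f :: [] by simp,
            getLast?_append_cons]
          simp
        rw [hh, hg] at hl1
        have : h = f := by injection hl1
        exact hpt h (by simp) (by simp [this])
    | nil =>
        rcases concat_cases u with rfl | ⟨u', c, rfl⟩
        · simp at hlen3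
        · rcases hd with ⟨_, _, hl2⟩
          have hdl : (([] : List Int) ++ f :: (u' ++ [c]) ++ f :: ([] : List Int)).dropLast
              = f :: (u' ++ [c]) := by
            rw [show ([] : List Int) ++ f :: (u' ++ [c]) ++ f :: ([] : List Int)
                = (f :: (u' ++ [c])) ++ [f] by simp, List.dropLast_concat]
          rw [hdl] at hl2
          have hh : (([] : List Int) ++ f :: (u' ++ [c]) ++ f :: ([] : List Int)).head? = some f := by
            simp
          rw [hh] at hl2
          have hcl : (f :: (u' ++ [c])).getLast? = some c := by
            rw [show f :: (u' ++ [c]) = (f :: u') ++ [c] by simp, List.getLast?_concat]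
          rw [hcl] at hl2
          have : c = f := by
            have := hl2; injection this with h'; exact h'.symm
          exact hfu (by simp [this])
  · rcases hd with ⟨_, hl1, hl2⟩
    refine ⟨by simp; omega, ?_, ?_⟩
    · have e1 : (p ++ f :: u ++ f :: (l' ++ [b])).head? = (p ++ f :: (l' ++ [b])).head? := by
        cases p <;> simp
      have e2 : (p ++ f :: u ++ f :: (l' ++ [b])).getLast? = (p ++ f :: (l' ++ [b])).getLast? := by
        rw [show p ++ f :: u ++ f :: (l' ++ [b]) = (p ++ f :: u) ++ f :: (l' ++ [b]) by simp,
          getLast?_append_cons, getLast?_append_cons]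
      rw [← e1, ← e2]; exact hl1
    · have e1 : (p ++ f :: u ++ f :: (l' ++ [b])).head? = (p ++ f :: (l' ++ [b])).head? := by
        cases p <;> simp
      have e2 : (p ++ f :: u ++ f :: (l' ++ [b])).dropLast.getLast?
          = (p ++ f :: (l' ++ [b])).dropLast.getLast? := by
        rw [show p ++ f :: u ++ f :: (l' ++ [b]) = (p ++ f :: u ++ f :: l') ++ [b] by simp,
          show p ++ f :: (l' ++ [b]) = (p ++ f :: l') ++ [b] by simp,
          List.dropLast_concat, List.dropLast_concat,
          show p ++ f :: u ++ f :: l' = (p ++ f :: u) ++ f :: l' by simp,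
          getLast?_append_cons, getLast?_append_cons]
      rw [← e1, ← e2]; exact hl2

theorem whileA_D : ∀ (fuel : Nat) (s : List Int), D_cleanup_dead_ends s →
    s.length ≤ fuel + 2 → (pvWhileA fuel s).length = 2 := by
  intro fuel
  induction fuel with
  | zero =>
      intro s hd hl
      exact le_antisymm (by simpa using hl) hd.1
  | succ n ih =>
      intro s hd hl
      by_cases hlen : 2 < s.length
      · cases hfd : pvFirstDup s with
        | none => exact absurd (firstDup_none s hfd) (D_not_nodup s hd)
        | some v =>
            rcases v with ⟨i, j⟩
            rw [pvWhileA_succ_some n s i j hfd hlen]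
            rcases firstDup_some s i j hfd with ⟨p, u, w, f, hdecomp, hpl, hjl, hnd, hnm, hfu⟩
            subst hdecomp
            rw [← hpl, pv_collapse_eq p u w f j hjl]
            have hdr := D_preserved_yes p u w f hnm hfu (by omega) hd
            apply ih _ hdr
            simp at hl ⊢
            omega
      · rw [pvWhileA_succ_small n s hlen]
        exact le_antisymm (by omega) hd.1

-- ===== VERDICT (by name: the statement is the Claim_ definition above) =====
theorem cleanup_dead_ends_spec : Claim_unchanged_cleanup_dead_ends := by
  intro s _ hnd
  unfold cleanup_dead_ends cleanup_dead_ends_alt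
  rcases whileA_spec s.length s hnd (by omega) with ⟨h1, h2⟩
  calc pvWhileA s.length s = List.foldl pvStep [] (pvWhileA s.length s) := (foldl_id _ h1).symm
    _ = List.foldl pvStep [] s := h2

theorem cleanup_dead_ends_changed : Claim_changed_cleanup_dead_ends := by
  unfold Claim_changed_cleanup_dead_ends; decide

theorem cleanup_dead_ends_tight : Claim_exact_cleanup_dead_ends := by
  intro s _ hd heq
  rcases alt_of_D s hd with ⟨x, hx⟩
  have h2 : (cleanup_dead_ends s).length = 2 := whileA_D s.length s hd (by omega)
  rw [heq, hx] at h2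
  simp at h2
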